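-- pv_equiv track=rewrite | github.com/jmom14/common-algorithm-exercises | python.py | solution
-- ===== SOURCE A (Python) =====
-- def solution(arr):
--     arr_copy = [None]*len(arr)
--
--     for i in range(len(arr_copy)):
--         if arr[i] and arr[i] >= 0 and arr[i] <= len(arr):
--             arr_copy[i] = 1
--
--     for i in range(len(arr_copy)):
--         if arr_copy[i] == None:
--             return i+1
--
--     return len(arr) + 1
-- ===== SOURCE B (Python) =====
-- def solution(arr):
--     n = len(arr)
--     for i in range(n):
--         if not (arr[i] and arr[i] >= 0 and arr[i] <= n):
--             return i + 1
--     return n + 1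
-- ===== Notes on version B (the rewrite author's own statement) =====
-- stated objective: simpler
-- what changed: Replaces A's build-a-marker-table-then-rescan two-pass structure with a single early-returning pass over the list.
import Mathlib
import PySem

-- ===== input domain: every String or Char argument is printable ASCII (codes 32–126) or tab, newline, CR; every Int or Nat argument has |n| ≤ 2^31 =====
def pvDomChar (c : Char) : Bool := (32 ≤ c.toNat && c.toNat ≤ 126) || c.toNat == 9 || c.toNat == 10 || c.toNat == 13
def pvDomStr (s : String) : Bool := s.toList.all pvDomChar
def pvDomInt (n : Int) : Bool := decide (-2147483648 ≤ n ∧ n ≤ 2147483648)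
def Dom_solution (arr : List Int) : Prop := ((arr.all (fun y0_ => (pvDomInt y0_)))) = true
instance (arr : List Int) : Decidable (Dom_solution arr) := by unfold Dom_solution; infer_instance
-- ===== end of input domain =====

-- B replaces A's build-a-marker-table-then-rescan two-pass structure with a single early-returning pass (simpler).


-- ===== PORT A =====
-- first loop: arr_copy[i] = 1 iff arr[i] is truthy (≠ 0) and 0 ≤ arr[i] ≤ len(arr)
def solMark (n : Int) (arr : List Int) : List (Option Int) :=
  arr.map (fun x => if x ≠ 0 ∧ 0 ≤ x ∧ x ≤ n then some 1 else none)

-- second loop: return i+1 at the first None entry, else len(arr)+1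
def solScanA (n : Int) : List (Option Int) → Int → Int
  | [], _ => n + 1
  | none :: _, i => i + 1
  | some _ :: rest, i => solScanA n rest (i + 1)

def solution (arr : List Int) : Int :=
  solScanA arr.length (solMark arr.length arr) 0

-- ===== PORT B =====
-- single pass: first index whose element fails the condition, else n+1
def solScanB (n : Int) : List Int → Int → Int
  | [], _ => n + 1
  | x :: rest, i => if x ≠ 0 ∧ 0 ≤ x ∧ x ≤ n then solScanB n rest (i + 1) else i + 1

def solution_alt (arr : List Int) : Int :=
  solScanB arr.length arr 0

-- ===== PRECONDITION & SPEC =====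
def Spec_solution (arr : List Int) (out : Int) : Prop := out = solution_alt arr
instance (arr : List Int) (out : Int) : Decidable (Spec_solution arr out) := by unfold Spec_solution; infer_instance

-- ===== CLAIM (what is proved, stated in full; the proofs are below) =====
def Claim_equal_solution : Prop := ∀ (arr : List Int), Dom_solution arr → Spec_solution arr (solution arr)

-- ===== LEMMAS AND PROOFS =====
theorem solScan_eq (n : Int) : ∀ (l : List Int) (i : Int),
    solScanA n (solMark n l) i = solScanB n l i := by
  intro l
  induction l with
  | nil => intro i; rfl
  | cons x rest ih =>
    intro i
    simp only [solMark, List.map] at *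
    by_cases h : x ≠ 0 ∧ 0 ≤ x ∧ x ≤ n
    · simp [solScanA, solScanB, h, ih]
    · simp [solScanA, solScanB, h]

-- ===== VERDICT (by name: the statement is the Claim_ definition above) =====
theorem solution_spec : Claim_equal_solution := by
  intro arr _
  unfold Spec_solution solution solution_alt
  exact solScan_eq _ arr 0
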